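-- pv_equiv track=rewrite | github.com/jooh9992/CodingTest | Programmers/무인도_여행.py | solution
-- ===== SOURCE A (Python) =====
-- from collections import deque
--
-- dx = [-1, 1, 0, 0]
--
-- dy = [0, 0, -1, 1]
--
-- def bfs(maps, i, j, n, m, visited):
--     visited[i][j] = 1
--     q = deque()
--     q.append((i,j))
--     day = int(maps[i][j])
--
--     while q:
--         x, y = q.popleft()
--
--         for p in range(4):
--             nx, ny = x+dx[p], y+dy[p]
--
--             if 0 <= nx < n and 0 <= ny < m and visited[nx][ny] == 0 and maps[nx][ny] != 'X':
--                 q.append((nx, ny))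
--                 day += int(maps[nx][ny])
--                 visited[nx][ny] = 1
--     return day
--
-- def solution(maps):
--     answer = []
--     n, m = len(maps), len(maps[0])
--     visited =[[0] * m for _ in range(n)]
--
--     for i in range(n):
--         for j in range(m):
--             if maps[i][j] != 'X' and visited[i][j] == 0:
--                 answer.append(bfs(maps, i, j, n, m, visited))
--
--     if answer:
--         return sorted(answer)
--     else:
--         return [-1]
-- ===== SOURCE B (Python) =====
-- def solution(maps):
--     n, m = len(maps), len(maps[0])
--     seen = set()
--     sums = []
--     for i in range(n):
--         for j in range(m):
--             if maps[i][j] != 'X' and (i, j) not in seen: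
--                 total = 0
--                 stack = [(i, j)]
--                 while stack:
--                     x, y = stack.pop()
--                     if (x, y) in seen or x < 0 or x >= n or y < 0 or y >= m or maps[x][y] == 'X':
--                         continue
--                     seen.add((x, y))
--                     total += int(maps[x][y])
--                     stack.extend(((x - 1, y), (x + 1, y), (x, y - 1), (x, y + 1)))
--                 sums.append(total)
--     return sorted(sums) if sums else [-1]
-- ===== Notes on version B (the rewrite author's own statement) =====
-- stated objective: alternative
-- what changed: A explores each island by BFS (collections.deque popped from the front, an n×m visited matrix, neighbour values added at enqueue time after per-neighbour validation); B explores it by an iterative depth-first search that pops raw candidate cells from the end of an explicit stack, validates bounds/'X'/seen only at pop time, adds the cell value at pop, and tracks seen cells in a hash set instead of a matrix.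
import Mathlib
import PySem

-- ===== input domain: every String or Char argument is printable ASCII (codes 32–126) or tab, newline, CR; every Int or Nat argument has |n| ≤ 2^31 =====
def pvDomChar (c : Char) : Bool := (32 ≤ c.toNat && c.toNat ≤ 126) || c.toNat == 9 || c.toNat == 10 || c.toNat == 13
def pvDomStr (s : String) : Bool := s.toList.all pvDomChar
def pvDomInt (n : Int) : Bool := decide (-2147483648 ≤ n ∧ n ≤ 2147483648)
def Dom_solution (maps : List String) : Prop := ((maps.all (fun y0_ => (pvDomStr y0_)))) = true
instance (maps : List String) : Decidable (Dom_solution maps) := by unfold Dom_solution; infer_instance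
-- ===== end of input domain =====

-- B replaces A's per-island BFS (deque + n×m visited matrix, value added at enqueue) by an
-- iterative DFS over an explicit stack with a hash set of seen cells, validating and adding
-- each cell's value at pop time (objective: alternative — same asymptotic cost, different
-- traversal and data structures).

-- ===== PORT A =====

-- maps[i][j] as an Option Char (none = IndexError, excluded by Pre_)
def pvAt (maps : List String) (i j : Int) : Option Char :=
  match PySem.List.pyGet? maps i with
  | some row => PySem.Str.pyGet? row j
  | none => none

-- maps[i][j] != 'X'   (none = Python IndexError, excluded by Pre_; we return false there)
def pvNeX (maps : List String) (i j : Int) : Bool :=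
  match pvAt maps i j with
  | some c => !(c == 'X')
  | none => false

-- int(maps[i][j])  (exact for the digit chars Pre_ admits; Python raises otherwise)
def pvVal (maps : List String) (i j : Int) : Int :=
  match pvAt maps i j with
  | some c => (PySem.Int.ofStr? (String.ofList [c])).getD 0
  | none => 0

-- visited[i][j]  (all reads are guarded to be in range)
def pvVget (v : List (List Int)) (i j : Int) : Int :=
  match PySem.List.pyGet? v i with
  | some row => (PySem.List.pyGet? row j).getD 0
  | none => 0

-- visited[i][j] = x  (all writes are in range)
def pvVset (v : List (List Int)) (i j : Int) (x : Int) : List (List Int) :=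
  PySem.List.pySetD v i (PySem.List.pySetD (PySem.List.pyGetD v i []) j x)

def pvDxs : List Int := [-1, 1, 0, 0]
def pvDys : List Int := [0, 0, -1, 1]

-- body of 'for p in range(4)' inside A's bfs
def pvBfsStep (maps : List String) (n m x y : Int)
    (st : List (Int × Int) × Int × List (List Int)) (p : Int) :
    List (Int × Int) × Int × List (List Int) :=
  let nx := x + PySem.List.pyGetD pvDxs p 0
  let ny := y + PySem.List.pyGetD pvDys p 0
  if 0 ≤ nx ∧ nx < n ∧ 0 ≤ ny ∧ ny < m ∧ pvVget st.2.2 nx ny = 0 ∧ pvNeX maps nx ny = true then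
    (st.1 ++ [(nx, ny)], st.2.1 + pvVal maps nx ny, pvVset st.2.2 nx ny 1)
  else st

-- A's 'while q:' loop (fuel-bounded: the grid has ≤ n*m cells and every enqueue marks a
-- fresh cell, so the fuel passed by pvBfs always suffices; proved below)
def pvBfsLoop (maps : List String) (n m : Int) :
    Nat → List (Int × Int) → Int → List (List Int) → Int × List (List Int)
  | 0, _, day, vis => (day, vis)
  | _ + 1, [], day, vis => (day, vis)
  | fuel + 1, (x, y) :: rest, day, vis =>
      let st := (PySem.List.pyRange 0 4 1).foldl (pvBfsStep maps n m x y) (rest, day, vis)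
      pvBfsLoop maps n m fuel st.1 st.2.1 st.2.2

def pvBfs (maps : List String) (i j n m : Int) (visited : List (List Int)) :
    Int × List (List Int) :=
  pvBfsLoop maps n m (2 * (n.toNat * m.toNat) + 2) [(i, j)] (pvVal maps i j)
    (pvVset visited i j 1)

-- body of 'for j in range(m)' in A's solution
def pvColA (maps : List String) (n m i : Int) (st : List Int × List (List Int)) (j : Int) :
    List Int × List (List Int) :=
  if pvNeX maps i j = true ∧ pvVget st.2 i j = 0 then
    let r := pvBfs maps i j n m st.2
    (st.1 ++ [r.1], r.2)
  else st

def pvRowA (maps : List String) (n m : Int) (st : List Int × List (List Int)) (i : Int) :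
    List Int × List (List Int) :=
  (PySem.List.pyRange 0 m 1).foldl (pvColA maps n m i) st

def solution (maps : List String) : List Int :=
  let n : Int := PySem.List.len maps
  let m : Int :=
    match PySem.List.pyGet? maps 0 with     -- maps[0]: IndexError on [], excluded by Pre_
    | some r => PySem.Str.len r
    | none => 0
  let visited0 : List (List Int) := List.replicate n.toNat (List.replicate m.toNat (0 : Int))
  let res := (PySem.List.pyRange 0 n 1).foldl (pvRowA maps n m) ([], visited0)
  if res.1 ≠ [] then PySem.List.sorted res.1 (fun v => v) false else [-1]

-- ===== PORT B =====

-- maps[x][y] == 'X'  (none = Python IndexError, excluded by Pre_; we return true there)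
def pvEqX (maps : List String) (i j : Int) : Bool :=
  match pvAt maps i j with
  | some c => c == 'X'
  | none => true

-- B's 'while stack:' loop: pop from the end, validate at pop, push the four raw neighbours
-- (fuel-bounded: every marking consumes one of ≤ n*m fresh cells and pushes 4, so the fuel
-- passed by pvColB always suffices; proved below)
def pvDfsLoop (maps : List String) (n m : Int) :
    Nat → List (Int × Int) → Int → PySem.Set (Int × Int) → Int × PySem.Set (Int × Int)
  | 0, _, total, seen => (total, seen)
  | fuel + 1, stack, total, seen =>
    match PySem.List.pop? stack (-1) with
    | none => (total, seen)
    | some ((x, y), rest) =>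
      if PySem.Set.contains seen (x, y) = true ∨ x < 0 ∨ n ≤ x ∨ y < 0 ∨ m ≤ y ∨
          pvEqX maps x y = true then
        pvDfsLoop maps n m fuel rest total seen
      else
        pvDfsLoop maps n m fuel
          (rest ++ [(x - 1, y), (x + 1, y), (x, y - 1), (x, y + 1)])
          (total + pvVal maps x y) (PySem.Set.add seen (x, y))

-- body of 'for j in range(m)' in B's solution
def pvColB (maps : List String) (n m i : Int)
    (st : List Int × PySem.Set (Int × Int)) (j : Int) :
    List Int × PySem.Set (Int × Int) :=
  if pvNeX maps i j = true ∧ ¬ PySem.Set.contains st.2 (i, j) = true then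
    let r := pvDfsLoop maps n m (5 * (n.toNat * m.toNat) + 2) [(i, j)] 0 st.2
    (st.1 ++ [r.1], r.2)
  else st

def pvRowB (maps : List String) (n m : Int)
    (st : List Int × PySem.Set (Int × Int)) (i : Int) :
    List Int × PySem.Set (Int × Int) :=
  (PySem.List.pyRange 0 m 1).foldl (pvColB maps n m i) st

def solution_alt (maps : List String) : List Int :=
  let n : Int := PySem.List.len maps
  let m : Int :=
    match PySem.List.pyGet? maps 0 with     -- maps[0]: IndexError on [], excluded by Pre_
    | some r => PySem.Str.len r
    | none => 0
  let res := (PySem.List.pyRange 0 n 1).foldl (pvRowB maps n m) ([], PySem.Set.empty)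
  if res.1 ≠ [] then PySem.List.sorted res.1 (fun v => v) false else [-1]

-- ===== PRECONDITION & SPEC =====

-- Pre_ excludes exactly the inputs where Python A raises: the empty list (maps[0] is an
-- IndexError) and grids whose rows are shorter than the first row (IndexError) or whose
-- first len(maps[0]) characters contain a char that is neither 'X' nor a digit
-- (int() ValueError).
def Pre_solution (maps : List String) : Prop :=
  maps ≠ [] ∧
  (maps.all (fun row => decide ((maps.headI).toList.length ≤ row.toList.length) &&
     (row.toList.take ((maps.headI).toList.length)).all
       (fun c => c == 'X' || c.isDigit))) = true
instance (maps : List String) : Decidable (Pre_solution maps) := by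
  unfold Pre_solution; infer_instance

def pvWitness_solution : List String := ["12", "3X"]

def Spec_solution (maps : List String) (out : List Int) : Prop := out = solution_alt maps
instance (maps : List String) (out : List Int) : Decidable (Spec_solution maps out) := by
  unfold Spec_solution; infer_instance

-- ===== CLAIM (what is proved, stated in full; the proofs are below) =====
def Claim_equal_solution : Prop :=
  ∀ (maps : List String), Dom_solution maps → Pre_solution maps →
    Spec_solution maps (solution maps)

-- ===== LEMMAS AND PROOFS =====
-- in-range cells of the n×m grid
def pvInR (n m : Int) (c : Int × Int) : Prop :=
  0 ≤ c.1 ∧ c.1 < n ∧ 0 ≤ c.2 ∧ c.2 < m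

-- an island cell
def pvValid (maps : List String) (n m : Int) (c : Int × Int) : Prop :=
  pvInR n m c ∧ pvNeX maps c.1 c.2 = true

-- grid adjacency (the four directions of both programs)
def pvAdj (a b : Int × Int) : Prop :=
  b = (a.1 - 1, a.2) ∨ b = (a.1 + 1, a.2) ∨ b = (a.1, a.2 - 1) ∨ b = (a.1, a.2 + 1)

-- one traversal step between island cells
def pvStep (maps : List String) (n m : Int) (a b : Int × Int) : Prop :=
  pvValid maps n m a ∧ pvValid maps n m b ∧ pvAdj a b

-- the island component of a seed cell
def pvReach (maps : List String) (n m : Int) (a b : Int × Int) : Prop :=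
  Relation.ReflTransGen (pvStep maps n m) a b

-- a set of cells closed under traversal steps
def pvClosed (maps : List String) (n m : Int) (S : Int × Int → Prop) : Prop :=
  ∀ a, S a → ∀ b, pvStep maps n m a b → S b

-- A's mark predicate / B's mark predicate
def pvMemA (v : List (List Int)) (c : Int × Int) : Bool := !(pvVget v c.1 c.2 == 0)
def pvMemB (seen : PySem.Set (Int × Int)) (c : Int × Int) : Bool :=
  PySem.Set.contains seen c

-- grid shape of A's visited matrix
def pvShape (n m : Int) (v : List (List Int)) : Prop :=
  v.length = n.toNat ∧ ∀ row ∈ v, row.length = m.toNat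

-- number of unmarked in-range cells (the fuel measure of both loops)
noncomputable def pvRect (n m : Int) : Finset (Int × Int) :=
  Finset.Icc 0 (n - 1) ×ˢ Finset.Icc 0 (m - 1)
noncomputable def pvU (n m : Int) (mem : Int × Int → Bool) : Nat :=
  ((pvRect n m).filter (fun c => mem c = false)).card

theorem pvEqX_eq (maps : List String) (i j : Int) :
    pvEqX maps i j = !pvNeX maps i j := by
  unfold pvEqX pvNeX; cases pvAt maps i j <;> simp

theorem pvMemA_false_iff (v : List (List Int)) (c : Int × Int) :
    pvMemA v c = false ↔ pvVget v c.1 c.2 = 0 := by simp [pvMemA]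

theorem pvMemB_true_iff (s : PySem.Set (Int × Int)) (c : Int × Int) :
    pvMemB s c = true ↔ c ∈ s := by simp [pvMemB]

theorem pvVget_eq (v : List (List Int)) (i j : Int) (hi : 0 ≤ i) (hj : 0 ≤ j) :
    pvVget v i j = ((v[i.toNat]?.getD [])[j.toNat]?).getD 0 := by
  unfold pvVget
  rw [PySem.List.pyGet?_of_nonneg v hi]
  cases h : v[i.toNat]? with
  | none => simp
  | some row => simp [PySem.List.pyGet?_of_nonneg row hj]

theorem pvVset_eq (v : List (List Int)) (i j x : Int) (hi : 0 ≤ i) (hj : 0 ≤ j) :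
    pvVset v i j x = v.set i.toNat ((v[i.toNat]?.getD []).set j.toNat x) := by
  unfold pvVset
  rw [PySem.List.pySetD_of_nonneg v _ hi,
    PySem.List.pySetD_of_nonneg (PySem.List.pyGetD v i []) x hj]
  have : PySem.List.pyGetD v i [] = v[i.toNat]?.getD [] := by
    unfold PySem.List.pyGetD
    rw [PySem.List.pyGet?_of_nonneg v hi]
  rw [this]

theorem pvShape_pvVset (n m : Int) (v : List (List Int)) (i j x : Int)
    (hsh : pvShape n m v) (hij : pvInR n m (i, j)) :
    pvShape n m (pvVset v i j x) := by
  obtain ⟨hi, hi', hj, hj'⟩ := hij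
  rw [pvVset_eq v i j x hi hj]
  refine ⟨by simpa using hsh.1, ?_⟩
  intro row hrow
  rcases List.mem_or_eq_of_mem_set hrow with h | h
  · exact hsh.2 row h
  · subst h
    have hlen : i.toNat < v.length := by
      rw [hsh.1]; omega
    have : v[i.toNat]? = some v[i.toNat] := List.getElem?_eq_getElem hlen
    rw [this]
    simp [hsh.2 _ (List.getElem_mem hlen)]

theorem pvVget_pvVset (n m : Int) (v : List (List Int)) (i j a b x : Int)
    (hsh : pvShape n m v) (hij : pvInR n m (i, j)) (hab : pvInR n m (a, b)) :
    pvVget (pvVset v i j x) a b = if a = i ∧ b = j then x else pvVget v a b := by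
  obtain ⟨hi, hi', hj, hj'⟩ := hij
  obtain ⟨ha, ha', hb, hb'⟩ := hab
  have hilen : i.toNat < v.length := by rw [hsh.1]; omega
  have halen : a.toNat < v.length := by rw [hsh.1]; omega
  have hrowi : v[i.toNat]? = some v[i.toNat] := List.getElem?_eq_getElem hilen
  have hjlen : j.toNat < (v[i.toNat]).length := by
    rw [hsh.2 _ (List.getElem_mem hilen)]; omega
  rw [pvVset_eq v i j x hi hj, pvVget_eq _ a b ha hb, pvVget_eq v a b ha hb, hrowi]
  simp only [Option.getD_some]
  have hrowa : v[a.toNat]? = some v[a.toNat] := List.getElem?_eq_getElem halen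
  by_cases hai : a = i
  · subst hai
    have hset : (v.set a.toNat ((v[a.toNat]).set j.toNat x))[a.toNat]? =
        some ((v[a.toNat]).set j.toNat x) :=
      List.getElem?_set_self (by simpa using halen)
    rw [hset]
    simp only [Option.getD_some]
    by_cases hbj : b = j
    · subst hbj
      have hbn : b.toNat < (v[a.toNat]).length := hjlen
      simp [hbn]
    · have hne : b.toNat ≠ j.toNat := by omega
      rw [List.getElem?_set_ne (Ne.symm hne)]
      simp [hbj, hrowa]
  · have hne : a.toNat ≠ i.toNat := by omega
    rw [List.getElem?_set_ne (Ne.symm hne)]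
    simp [hai]

theorem mem_pvRect (n m : Int) (c : Int × Int) : c ∈ pvRect n m ↔ pvInR n m c := by
  cases c with
  | mk a b =>
    simp [pvRect, pvInR, Finset.mem_Icc]
    try omega

theorem pvU_le (n m : Int) (mem : Int × Int → Bool) :
    pvU n m mem ≤ n.toNat * m.toNat := by
  calc pvU n m mem ≤ (pvRect n m).card := Finset.card_filter_le _ _
    _ = n.toNat * m.toNat := by
        simp [pvRect, Finset.card_product, Int.card_Icc]

theorem pvU_mark (n m : Int) (mem mem' : Int × Int → Bool) (c₀ : Int × Int)
    (h₀ : pvInR n m c₀) (hfresh : mem c₀ = false) (hnew : mem' c₀ = true)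
    (hrest : ∀ c, pvInR n m c → c ≠ c₀ → mem' c = mem c) :
    pvU n m mem' + 1 = pvU n m mem := by
  have hset : (pvRect n m).filter (fun c => mem' c = false) =
      ((pvRect n m).filter (fun c => mem c = false)).erase c₀ := by
    ext c
    simp only [Finset.mem_erase, Finset.mem_filter]
    constructor
    · intro ⟨hc, hc'⟩
      have hne : c ≠ c₀ := by rintro rfl; rw [hnew] at hc'; exact absurd hc' (by simp)
      exact ⟨hne, hc, by rw [← hrest c ((mem_pvRect n m c).1 hc) hne]; exact hc'⟩
    · intro ⟨hne, hc, hc'⟩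
      exact ⟨hc, by rw [hrest c ((mem_pvRect n m c).1 hc) hne]; exact hc'⟩
  have hmem : c₀ ∈ (pvRect n m).filter (fun c => mem c = false) := by
    simp [Finset.mem_filter, (mem_pvRect n m c₀).2 h₀, hfresh]
  rw [pvU, pvU, hset, Finset.card_erase_of_mem hmem]
  have := Finset.card_pos.2 ⟨c₀, hmem⟩
  omega

theorem pvAdj_symm {a b : Int × Int} (h : pvAdj a b) : pvAdj b a := by
  rcases h with h | h | h | h <;> subst h <;> unfold pvAdj <;> cases a <;> simp

theorem pvAdj_iff (x y : Int) (b : Int × Int) :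
    pvAdj (x, y) b ↔ b ∈ [(x - 1, y), (x + 1, y), (x, y - 1), (x, y + 1)] := by
  simp [pvAdj]

theorem pvStep_symm {maps : List String} {n m : Int} {a b : Int × Int}
    (h : pvStep maps n m a b) : pvStep maps n m b a :=
  ⟨h.2.1, h.1, pvAdj_symm h.2.2⟩

theorem pvReach_valid {maps : List String} {n m : Int} {a b : Int × Int}
    (ha : pvValid maps n m a) (h : pvReach maps n m a b) : pvValid maps n m b := by
  induction h with
  | refl => exact ha
  | tail _ hstep ih => exact hstep.2.1

theorem pvClosed_reach_subset {maps : List String} {n m : Int} {S : Int × Int → Prop}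
    (hcl : pvClosed maps n m S) {a : Int × Int} (ha : S a) {b : Int × Int}
    (h : pvReach maps n m a b) : S b := by
  induction h with
  | refl => exact ha
  | tail _ hstep ih => exact hcl _ ih _ hstep

theorem pvReach_symm {maps : List String} {n m : Int} {a b : Int × Int}
    (h : pvReach maps n m a b) : pvReach maps n m b a := by
  induction h with
  | refl => exact Relation.ReflTransGen.refl
  | tail _ hstep ih => exact Relation.ReflTransGen.head (pvStep_symm hstep) ih

theorem pvReach_closed (maps : List String) (n m : Int) (s : Int × Int) :
    pvClosed maps n m (fun c => pvReach maps n m s c) := by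
  intro a ha b hstep
  exact Relation.ReflTransGen.tail ha hstep

-- the neighbour examined by direction p
def pvNbr (x y p : Int) : Int × Int :=
  (x + PySem.List.pyGetD pvDxs p 0, y + PySem.List.pyGetD pvDys p 0)

theorem pvNbr0 (x y : Int) : pvNbr x y 0 = (x - 1, y) := by
  have h1 : PySem.List.pyGetD pvDxs 0 0 = -1 := by decide
  have h2 : PySem.List.pyGetD pvDys 0 0 = 0 := by decide
  unfold pvNbr; rw [h1, h2]; simp [Prod.ext_iff]; omega

theorem pvNbr1 (x y : Int) : pvNbr x y 1 = (x + 1, y) := by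
  have h1 : PySem.List.pyGetD pvDxs 1 0 = 1 := by decide
  have h2 : PySem.List.pyGetD pvDys 1 0 = 0 := by decide
  unfold pvNbr; rw [h1, h2]; simp

theorem pvNbr2 (x y : Int) : pvNbr x y 2 = (x, y - 1) := by
  have h1 : PySem.List.pyGetD pvDxs 2 0 = 0 := by decide
  have h2 : PySem.List.pyGetD pvDys 2 0 = -1 := by decide
  unfold pvNbr; rw [h1, h2]; simp [Prod.ext_iff]; omega

theorem pvNbr3 (x y : Int) : pvNbr x y 3 = (x, y + 1) := by
  have h1 : PySem.List.pyGetD pvDxs 3 0 = 0 := by decide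
  have h2 : PySem.List.pyGetD pvDys 3 0 = 1 := by decide
  unfold pvNbr; rw [h1, h2]; simp

theorem pvAdj_pvNbr (x y p : Int) (hp : 0 ≤ p ∧ p < 4) : pvAdj (x, y) (pvNbr x y p) := by
  have : p = 0 ∨ p = 1 ∨ p = 2 ∨ p = 3 := by omega
  rcases this with rfl | rfl | rfl | rfl
  · rw [pvNbr0]; exact Or.inl rfl
  · rw [pvNbr1]; exact Or.inr (Or.inl rfl)
  · rw [pvNbr2]; exact Or.inr (Or.inr (Or.inl rfl))
  · rw [pvNbr3]; exact Or.inr (Or.inr (Or.inr rfl))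

theorem pvFoldDirs_spec (maps : List String) (n m x y : Int)
    (hxy : pvValid maps n m (x, y)) :
    ∀ (ds : List Int), (∀ p ∈ ds, 0 ≤ p ∧ p < 4) →
    ∀ (rest : List (Int × Int)) (day : Int) (v : List (List Int)),
    pvShape n m v →
    ∃ (N : Finset (Int × Int)) (qn : List (Int × Int)),
      (∀ c ∈ N, pvStep maps n m (x, y) c ∧ pvMemA v c = false) ∧
      qn.Nodup ∧ (∀ c, c ∈ qn ↔ c ∈ N) ∧
      ((ds.foldl (pvBfsStep maps n m x y) (rest, day, v)).1 = rest ++ qn ∧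
       (ds.foldl (pvBfsStep maps n m x y) (rest, day, v)).2.1 =
         day + ∑ c ∈ N, pvVal maps c.1 c.2 ∧
       pvShape n m (ds.foldl (pvBfsStep maps n m x y) (rest, day, v)).2.2 ∧
       (∀ c, pvInR n m c →
         (pvMemA (ds.foldl (pvBfsStep maps n m x y) (rest, day, v)).2.2 c = true ↔
           pvMemA v c = true ∨ c ∈ N)) ∧
       pvU n m (pvMemA (ds.foldl (pvBfsStep maps n m x y) (rest, day, v)).2.2) + N.card =
         pvU n m (pvMemA v) ∧
       (∀ p ∈ ds, pvStep maps n m (x, y) (pvNbr x y p) →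
         pvMemA (ds.foldl (pvBfsStep maps n m x y) (rest, day, v)).2.2 (pvNbr x y p) = true)) := by
  intro ds
  induction ds with
  | nil =>
    intro _ rest day v hsh
    exact ⟨∅, [], by simp, by simp, by simp, by simp, by simp, hsh, by simp, by simp, by simp⟩
  | cons p ds ih =>
    intro hds rest day v hsh
    have hp := hds p (List.mem_cons_self)
    have hds' : ∀ q ∈ ds, 0 ≤ q ∧ q < 4 := fun q hq => hds q (List.mem_cons_of_mem _ hq)
    rw [List.foldl_cons]
    have hunf : pvBfsStep maps n m x y (rest, day, v) p =
        (if 0 ≤ (pvNbr x y p).1 ∧ (pvNbr x y p).1 < n ∧ 0 ≤ (pvNbr x y p).2 ∧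
            (pvNbr x y p).2 < m ∧ pvVget v (pvNbr x y p).1 (pvNbr x y p).2 = 0 ∧
            pvNeX maps (pvNbr x y p).1 (pvNbr x y p).2 = true then
          (rest ++ [pvNbr x y p], day + pvVal maps (pvNbr x y p).1 (pvNbr x y p).2,
            pvVset v (pvNbr x y p).1 (pvNbr x y p).2 1)
        else (rest, day, v)) := rfl
    rw [hunf]
    set nb := pvNbr x y p with hnb
    by_cases hg : 0 ≤ nb.1 ∧ nb.1 < n ∧ 0 ≤ nb.2 ∧ nb.2 < m ∧
        pvVget v nb.1 nb.2 = 0 ∧ pvNeX maps nb.1 nb.2 = true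
    · rw [if_pos hg]
      have hInR : pvInR n m nb := ⟨hg.1, hg.2.1, hg.2.2.1, hg.2.2.2.1⟩
      have hfresh : pvMemA v nb = false := by simp [pvMemA, hg.2.2.2.2.1]
      have hneX : pvNeX maps nb.1 nb.2 = true := hg.2.2.2.2.2
      have hnbvalid : pvValid maps n m nb := ⟨hInR, hneX⟩
      have hstepnb : pvStep maps n m (x, y) nb := ⟨hxy, hnbvalid, pvAdj_pvNbr x y p hp⟩
      set v₁ := pvVset v nb.1 nb.2 1 with hv₁
      have hsh₁ : pvShape n m v₁ := pvShape_pvVset n m v nb.1 nb.2 1 hsh hInR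
      have hmem₁ : ∀ c, pvInR n m c →
          (pvMemA v₁ c = true ↔ pvMemA v c = true ∨ c = nb) := by
        intro c hc
        have := pvVget_pvVset n m v nb.1 nb.2 c.1 c.2 1 hsh hInR hc
        simp only [pvMemA, hv₁]
        rw [this]
        by_cases hceq : c = nb
        · subst hceq; simp
        · have : ¬ (c.1 = nb.1 ∧ c.2 = nb.2) := by
            intro hh; exact hceq (Prod.ext_iff.2 hh)
          rw [if_neg this]; simp [hceq]
      have hmark : pvMemA v₁ nb = true := (hmem₁ nb hInR).2 (Or.inr rfl)
      have hU₁ : pvU n m (pvMemA v₁) + 1 = pvU n m (pvMemA v) := by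
        apply pvU_mark n m (pvMemA v) (pvMemA v₁) nb hInR hfresh hmark
        intro c hc hne
        have hiff := hmem₁ c hc
        cases hA : pvMemA v c
        · cases hB : pvMemA v₁ c
          · rfl
          · rcases hiff.1 hB with h | h
            · rw [hA] at h; cases h
            · exact absurd h hne
        · rw [hiff.2 (Or.inl hA)]
      obtain ⟨N', qn', hN'props, hnodup', hqn', hq1, hq2, hq3, hq4, hq5, hq6⟩ :=
        ih hds' (rest ++ [nb]) (day + pvVal maps nb.1 nb.2) v₁ hsh₁
      have hnbN' : nb ∉ N' := by
        intro hmem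
        have := (hN'props nb hmem).2
        rw [hmark] at this; cases this
      refine ⟨insert nb N', nb :: qn', ?_, ?_, ?_, ?_, ?_, hq3, ?_, ?_, ?_⟩
      · intro c hc
        rcases Finset.mem_insert.1 hc with rfl | hc
        · exact ⟨hstepnb, hfresh⟩
        · obtain ⟨hstep, hfr⟩ := hN'props c hc
          refine ⟨hstep, ?_⟩
          cases hA : pvMemA v c
          · rfl
          · exfalso
            have : pvMemA v₁ c = true :=
              (hmem₁ c hstep.2.1.1).2 (Or.inl hA)
            rw [hfr] at this; cases this
      · exact List.nodup_cons.2 ⟨fun h => hnbN' ((hqn' nb).1 h), hnodup'⟩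
      · intro c
        simp only [List.mem_cons, Finset.mem_insert, hqn' c]
        try tauto
      · rw [hq1, List.append_assoc, List.singleton_append]
      · rw [hq2, Finset.sum_insert hnbN']
        ring
      · intro c hc
        rw [hq4 c hc, hmem₁ c hc, Finset.mem_insert]
        tauto
      · rw [Finset.card_insert_of_notMem hnbN']
        omega
      · intro q hq hstepq
        rcases List.mem_cons.1 hq with rfl | hq
        · have := (hq4 nb hInR).2 (Or.inl hmark)
          exact this
        · exact hq6 q hq hstepq
    · rw [if_neg hg]
      obtain ⟨N, qn, hNprops, hnodup, hqn, hq1, hq2, hq3, hq4, hq5, hq6⟩ :=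
        ih hds' rest day v hsh
      refine ⟨N, qn, hNprops, hnodup, hqn, hq1, hq2, hq3, hq4, hq5, ?_⟩
      intro q hq hstepq
      rcases List.mem_cons.1 hq with rfl | hq
      · -- direction p was skipped: its neighbour must already be marked
        have hInR : pvInR n m nb := hstepq.2.1.1
        have hneX : pvNeX maps nb.1 nb.2 = true := hstepq.2.1.2
        have hmarked : pvMemA v nb = true := by
          cases hA : pvMemA v nb
          · exfalso
            have hz : pvVget v nb.1 nb.2 = 0 := (pvMemA_false_iff v nb).1 hA
            exact hg ⟨hInR.1, hInR.2.1, hInR.2.2.1, hInR.2.2.2, hz, hneX⟩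
          · rfl
        exact (hq4 nb hInR).2 (Or.inl hmarked)
      · exact hq6 q hq hstepq

theorem pvRange4 : PySem.List.pyRange 0 4 1 = [0, 1, 2, 3] := by decide

theorem pvBfsLoop_spec (maps : List String) (n m : Int) (T : Int × Int → Prop)
    (hT : pvClosed maps n m T) :
    ∀ (fuel : Nat) (q : List (Int × Int)) (day : Int) (v : List (List Int)),
    pvShape n m v →
    q.length + 2 * pvU n m (pvMemA v) + 1 ≤ fuel →
    (∀ c ∈ q, pvValid maps n m c ∧ pvMemA v c = true ∧ T c) →
    (∀ a, pvMemA v a = true → ∀ b, pvStep maps n m a b →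
      pvMemA v b = true ∨ a ∈ q) →
    ∃ F : Finset (Int × Int),
      (∀ c ∈ F, pvValid maps n m c ∧ pvMemA v c = false ∧ T c) ∧
      ((pvBfsLoop maps n m fuel q day v).1 = day + ∑ c ∈ F, pvVal maps c.1 c.2 ∧
       pvShape n m (pvBfsLoop maps n m fuel q day v).2 ∧
       (∀ c, pvInR n m c →
         (pvMemA (pvBfsLoop maps n m fuel q day v).2 c = true ↔
           pvMemA v c = true ∨ c ∈ F)) ∧
       (∀ a, pvMemA (pvBfsLoop maps n m fuel q day v).2 a = true →
         ∀ b, pvStep maps n m a b →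
           pvMemA (pvBfsLoop maps n m fuel q day v).2 b = true)) := by
  intro fuel
  induction fuel with
  | zero => intro q day v _ hfuel _ _; omega
  | succ fuel ih =>
    intro q day v hsh hfuel hq hcl
    match q with
    | [] =>
      refine ⟨∅, by simp, ?_, hsh, ?_, ?_⟩
      · simp [pvBfsLoop]
      · intro c _; simp [pvBfsLoop]
      · intro a ha b hstep
        simp only [pvBfsLoop] at ha ⊢
        rcases hcl a ha b hstep with h | h
        · exact h
        · cases h
    | (x, y) :: rest =>
      obtain ⟨hxyvalid, hxymark, hxyT⟩ := hq (x, y) List.mem_cons_self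
      obtain ⟨N, qn, hNprops, hnodup, hqn, hf1, hf2, hf3, hf4, hf5, hf6⟩ :=
        pvFoldDirs_spec maps n m x y hxyvalid (PySem.List.pyRange 0 4 1)
          (by rw [pvRange4]; decide) rest day v hsh
      set st := (PySem.List.pyRange 0 4 1).foldl (pvBfsStep maps n m x y) (rest, day, v)
        with hst
      have hunf : pvBfsLoop maps n m (fuel + 1) ((x, y) :: rest) day v =
          pvBfsLoop maps n m fuel st.1 st.2.1 st.2.2 := rfl
      rw [hunf]
      -- the new queue has one entry per newly marked cell
      have hqncard : qn.length = N.card := by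
        have : qn.toFinset = N := by
          ext c; rw [List.mem_toFinset]; exact hqn c
        rw [← this, List.toFinset_card_of_nodup hnodup]
      -- coverage of all four neighbours of (x, y)
      have hcov : ∀ b, pvStep maps n m (x, y) b → pvMemA st.2.2 b = true := by
        intro b hstep
        have hb4 : b = (x - 1, y) ∨ b = (x + 1, y) ∨ b = (x, y - 1) ∨ b = (x, y + 1) :=
          hstep.2.2
        have : ∃ p ∈ PySem.List.pyRange 0 4 1, pvNbr x y p = b := by
          rw [pvRange4]
          rcases hb4 with hb | hb | hb | hb <;> rw [hb]
          · exact ⟨0, by decide, pvNbr0 x y⟩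
          · exact ⟨1, by decide, pvNbr1 x y⟩
          · exact ⟨2, by decide, pvNbr2 x y⟩
          · exact ⟨3, by decide, pvNbr3 x y⟩
        obtain ⟨p, hp, hpb⟩ := this
        have := hf6 p hp (by rw [hpb]; exact hstep)
        rw [hpb] at this
        exact this
      obtain ⟨F', hF'props, hr1, hr2, hr3, hr4⟩ :=
        ih st.1 st.2.1 st.2.2 hf3
          (by rw [hf1]; simp only [List.length_append, hqncard]; simp only [List.length_cons] at hfuel; omega)
          (by
            intro c hc
            rw [hf1] at hc
            rcases List.mem_append.1 hc with hc | hc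
            · obtain ⟨hv, hm, ht⟩ := hq c (List.mem_cons_of_mem _ hc)
              exact ⟨hv, (hf4 c hv.1).2 (Or.inl hm), ht⟩
            · have hcN := (hqn c).1 hc
              obtain ⟨hstep, _⟩ := hNprops c hcN
              exact ⟨hstep.2.1, (hf4 c hstep.2.1.1).2 (Or.inr hcN),
                hT _ hxyT _ hstep⟩)
          (by
            intro a ha b hstep
            have hInRa : pvInR n m a := hstep.1.1
            have hInRb : pvInR n m b := hstep.2.1.1
            rcases (hf4 a hInRa).1 ha with hmv | hmN
            · rcases hcl a hmv b hstep with h | h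
              · exact Or.inl ((hf4 b hInRb).2 (Or.inl h))
              · rcases List.mem_cons.1 h with rfl | hmem
                · exact Or.inl (hcov b hstep)
                · exact Or.inr (by rw [hf1]; exact List.mem_append_left _ hmem)
            · exact Or.inr (by rw [hf1]; exact List.mem_append_right _ ((hqn a).2 hmN)))
      have hdisj : Disjoint N F' := by
        rw [Finset.disjoint_left]
        intro c hcN hcF'
        have h1 := (hf4 c (hNprops c hcN).1.2.1.1).2 (Or.inr hcN)
        have h2 := (hF'props c hcF').2.1
        rw [h1] at h2; cases h2
      refine ⟨N ∪ F', ?_, ?_, hr2, ?_, hr4⟩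
      · intro c hc
        rcases Finset.mem_union.1 hc with hc | hc
        · obtain ⟨hstep, hfr⟩ := hNprops c hc
          exact ⟨hstep.2.1, hfr, hT _ hxyT _ hstep⟩
        · obtain ⟨hv, hfr, ht⟩ := hF'props c hc
          refine ⟨hv, ?_, ht⟩
          cases hA : pvMemA v c
          · rfl
          · exfalso
            have := (hf4 c hv.1).2 (Or.inl hA)
            rw [hfr] at this; cases this
      · rw [hr1, hf2, Finset.sum_union hdisj]
        ring
      · intro c hc
        rw [hr3 c hc, hf4 c hc, Finset.mem_union]
        tauto

theorem pvBfs_spec (maps : List String) (n m : Int) (v : List (List Int)) (i j : Int)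
    (hsh : pvShape n m v) (hv : pvValid maps n m (i, j)) (hfresh : pvMemA v (i, j) = false)
    (hcl : ∀ a, pvMemA v a = true → ∀ b, pvStep maps n m a b → pvMemA v b = true) :
    ∃ F : Finset (Int × Int),
      (∀ c, c ∈ F ↔ pvReach maps n m (i, j) c) ∧
      ((pvBfs maps i j n m v).1 = ∑ c ∈ F, pvVal maps c.1 c.2 ∧
       pvShape n m (pvBfs maps i j n m v).2 ∧
       (∀ c, pvInR n m c →
         (pvMemA (pvBfs maps i j n m v).2 c = true ↔ pvMemA v c = true ∨ c ∈ F)) ∧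
       (∀ a, pvMemA (pvBfs maps i j n m v).2 a = true → ∀ b, pvStep maps n m a b →
         pvMemA (pvBfs maps i j n m v).2 b = true)) := by
  have hInR : pvInR n m (i, j) := hv.1
  set v₁ := pvVset v i j 1 with hv₁
  have hsh₁ : pvShape n m v₁ := pvShape_pvVset n m v i j 1 hsh hInR
  have hmem₁ : ∀ c, pvInR n m c →
      (pvMemA v₁ c = true ↔ pvMemA v c = true ∨ c = (i, j)) := by
    intro c hc
    have := pvVget_pvVset n m v i j c.1 c.2 1 hsh hInR hc
    simp only [pvMemA, hv₁]
    rw [this]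
    by_cases hceq : c = (i, j)
    · subst hceq; simp
    · have : ¬ (c.1 = i ∧ c.2 = j) := by
        intro hh
        exact hceq (Prod.ext_iff.2 ⟨hh.1, hh.2⟩)
      rw [if_neg this]; simp [hceq]
  have hmark : pvMemA v₁ (i, j) = true := (hmem₁ (i, j) hInR).2 (Or.inr rfl)
  have hmono : ∀ c, pvInR n m c → pvMemA v c = true → pvMemA v₁ c = true :=
    fun c hc hm => (hmem₁ c hc).2 (Or.inl hm)
  have hU : pvU n m (pvMemA v₁) + 1 = pvU n m (pvMemA v) := by
    apply pvU_mark n m (pvMemA v) (pvMemA v₁) (i, j) hInR hfresh hmark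
    intro c hc hne
    have hiff := hmem₁ c hc
    cases hA : pvMemA v c
    · cases hB : pvMemA v₁ c
      · rfl
      · rcases hiff.1 hB with h | h
        · rw [hA] at h; cases h
        · exact absurd h hne
    · rw [hiff.2 (Or.inl hA)]
  have hfuel : [(i, j)].length + 2 * pvU n m (pvMemA v₁) + 1 ≤
      2 * (n.toNat * m.toNat) + 2 := by
    have := pvU_le n m (pvMemA v₁)
    simp only [List.length_singleton]
    omega
  obtain ⟨F', hF'props, hr1, hr2, hr3, hr4⟩ :=
    pvBfsLoop_spec maps n m (fun c => pvReach maps n m (i, j) c)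
      (pvReach_closed maps n m (i, j)) (2 * (n.toNat * m.toNat) + 2) [(i, j)]
      (pvVal maps i j) v₁ hsh₁ hfuel
      (by
        intro c hc
        rcases List.mem_singleton.1 hc with rfl
        exact ⟨hv, hmark, Relation.ReflTransGen.refl⟩)
      (by
        intro a ha b hstep
        by_cases haij : a = (i, j)
        · exact Or.inr (by rw [haij]; exact List.mem_singleton_self _)
        · have hav : pvMemA v a = true := by
            have hInRa : pvInR n m a := hstep.1.1
            rcases (hmem₁ a hInRa).1 ha with h | h
            · exact h
            · exact absurd h haij
          exact Or.inl (hmono b hstep.2.1.1 (hcl a hav b hstep)))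
  have hres : pvBfs maps i j n m v =
      pvBfsLoop maps n m (2 * (n.toNat * m.toNat) + 2) [(i, j)] (pvVal maps i j) v₁ := rfl
  have hijF' : (i, j) ∉ F' := by
    intro hmem
    have := (hF'props (i, j) hmem).2.1
    rw [hmark] at this; cases this
  refine ⟨insert (i, j) F', ?_, ?_, by rw [hres]; exact hr2, ?_, by rw [hres]; exact hr4⟩
  · intro c
    constructor
    · intro hc
      rcases Finset.mem_insert.1 hc with rfl | hc
      · exact Relation.ReflTransGen.refl
      · exact (hF'props c hc).2.2
    · intro hreach
      -- every reachable cell ends up marked, is not previously marked, hence is in F'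
      have hcv : pvValid maps n m c := pvReach_valid hv hreach
      have hmarked : pvMemA (pvBfsLoop maps n m (2 * (n.toNat * m.toNat) + 2) [(i, j)]
          (pvVal maps i j) v₁).2 c = true := by
        refine pvClosed_reach_subset (S := fun c => pvMemA (pvBfsLoop maps n m
          (2 * (n.toNat * m.toNat) + 2) [(i, j)] (pvVal maps i j) v₁).2 c = true)
          ?_ ?_ hreach
        · intro a ha b hstep
          exact hr4 a ha b hstep
        · exact (hr3 (i, j) hInR).2 (Or.inl hmark)
      rcases (hr3 c hcv.1).1 hmarked with h | h
      · rcases (hmem₁ c hcv.1).1 h with h' | h'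
        · -- c was already marked before the call: impossible, it reaches the fresh seed
          exfalso
          have : pvMemA v (i, j) = true :=
            pvClosed_reach_subset (S := fun z => pvMemA v z = true) hcl h'
              (pvReach_symm hreach)
          rw [hfresh] at this; cases this
        · exact (by rw [h']; exact Finset.mem_insert_self _ _)
      · exact Finset.mem_insert_of_mem h
  · rw [hres, hr1, Finset.sum_insert hijF']
    try ring
  · intro c hc
    rw [hres, hr3 c hc, hmem₁ c hc, Finset.mem_insert]
    tauto

theorem pvMemB_add (seen : PySem.Set (Int × Int)) (x c : Int × Int) :
    pvMemB (PySem.Set.add seen x) c = true ↔ pvMemB seen c = true ∨ c = x := by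
  simp only [pvMemB, PySem.Set.contains_iff, PySem.Set.mem_add]

theorem pvDfsLoop_spec (maps : List String) (n m : Int) (T : Int × Int → Prop)
    (hT : pvClosed maps n m T) :
    ∀ (fuel : Nat) (stack : List (Int × Int)) (total : Int) (seen : PySem.Set (Int × Int)),
    stack.length + 5 * pvU n m (pvMemB seen) + 1 ≤ fuel →
    (∀ c ∈ stack, pvValid maps n m c → T c) →
    (∀ a, pvMemB seen a = true → ∀ b, pvStep maps n m a b →
      pvMemB seen b = true ∨ b ∈ stack) →
    ∃ F : Finset (Int × Int),
      (∀ c ∈ F, pvValid maps n m c ∧ pvMemB seen c = false ∧ T c) ∧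
      ((pvDfsLoop maps n m fuel stack total seen).1 =
         total + ∑ c ∈ F, pvVal maps c.1 c.2 ∧
       (∀ c, pvMemB (pvDfsLoop maps n m fuel stack total seen).2 c = true ↔
         pvMemB seen c = true ∨ c ∈ F) ∧
       (∀ a, pvMemB (pvDfsLoop maps n m fuel stack total seen).2 a = true →
         ∀ b, pvStep maps n m a b →
           pvMemB (pvDfsLoop maps n m fuel stack total seen).2 b = true) ∧
       (∀ c ∈ stack, pvValid maps n m c →
         pvMemB (pvDfsLoop maps n m fuel stack total seen).2 c = true)) := by
  intro fuel
  induction fuel with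
  | zero => intro stack total seen hfuel _ _; omega
  | succ fuel ih =>
    intro stack total seen hfuel hstack hcl
    rcases stack.eq_nil_or_concat with rfl | ⟨ys, x, rfl⟩
    · have hunf : pvDfsLoop maps n m (fuel + 1) [] total seen = (total, seen) := rfl
      rw [hunf]
      refine ⟨∅, by simp, by simp, by simp, ?_, by simp⟩
      intro a ha b hstep
      rcases hcl a ha b hstep with h | h
      · exact h
      · cases h
    · simp only [List.concat_eq_append] at hfuel hstack hcl ⊢
      rcases x with ⟨xa, xb⟩
      have hpop : PySem.List.pop? (ys ++ [(xa, xb)]) (-1) = some ((xa, xb), ys) :=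
        PySem.List.pop?_last ys (xa, xb)
      have hunf : pvDfsLoop maps n m (fuel + 1) (ys ++ [(xa, xb)]) total seen =
          (if PySem.Set.contains seen (xa, xb) = true ∨ xa < 0 ∨ n ≤ xa ∨ xb < 0 ∨
              m ≤ xb ∨ pvEqX maps xa xb = true then
            pvDfsLoop maps n m fuel ys total seen
          else
            pvDfsLoop maps n m fuel
              (ys ++ [(xa - 1, xb), (xa + 1, xb), (xa, xb - 1), (xa, xb + 1)])
              (total + pvVal maps xa xb) (PySem.Set.add seen (xa, xb))) := by
        simp only [pvDfsLoop, hpop]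
      rw [hunf]
      simp only [List.length_append, List.length_singleton] at hfuel
      have hstack' : ∀ c ∈ ys, pvValid maps n m c → T c :=
        fun c hc => hstack c (List.mem_append_left _ hc)
      by_cases hg : PySem.Set.contains seen (xa, xb) = true ∨ xa < 0 ∨ n ≤ xa ∨ xb < 0 ∨
          m ≤ xb ∨ pvEqX maps xa xb = true
      · rw [if_pos hg]
        -- the popped cell is skipped: either already seen, or not an island cell
        have hxcase : pvValid maps n m (xa, xb) → pvMemB seen (xa, xb) = true := by
          intro hv
          rcases hg with h | h | h | h | h | h
          · exact h
          · exact absurd hv.1.1 (by simpa using h)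
          · exact absurd hv.1.2.1 (by omega)
          · exact absurd hv.1.2.2.1 (by simpa using h)
          · exact absurd hv.1.2.2.2 (by omega)
          · rw [pvEqX_eq, hv.2] at h; cases h
        obtain ⟨F, hFprops, hr1, hr2, hr3, hr4⟩ :=
          ih ys total seen (by omega) hstack'
            (by
              intro a ha b hstep
              rcases hcl a ha b hstep with h | h
              · exact Or.inl h
              · rcases List.mem_append.1 h with h' | h'
                · exact Or.inr h'
                · rcases List.mem_singleton.1 h' with rfl
                  exact Or.inl (hxcase hstep.2.1))
        refine ⟨F, hFprops, hr1, hr2, hr3, ?_⟩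
        intro c hc hv
        rcases List.mem_append.1 hc with h' | h'
        · exact hr4 c h' hv
        · rcases List.mem_singleton.1 h' with rfl
          exact (hr2 _).2 (Or.inl (hxcase hv))
      · rw [if_neg hg]
        simp only [not_or] at hg
        obtain ⟨hnseen, hb1, hb2, hb3, hb4, hneqx⟩ := hg
        have hneX : pvNeX maps xa xb = true := by
          rw [pvEqX_eq] at hneqx
          cases h : pvNeX maps xa xb
          · rw [h] at hneqx; simp at hneqx
          · rfl
        have hInR : pvInR n m (xa, xb) := ⟨by omega, by omega, by omega, by omega⟩
        have hvalid : pvValid maps n m (xa, xb) := ⟨hInR, hneX⟩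
        have hTx : T (xa, xb) :=
          hstack (xa, xb) (List.mem_append_right _ (List.mem_singleton_self _)) hvalid
        have hfresh : pvMemB seen (xa, xb) = false := by
          cases h : pvMemB seen (xa, xb)
          · rfl
          · exact absurd (by simpa [pvMemB] using h) (by simpa [pvMemB] using hnseen)
        set seen₁ := PySem.Set.add seen (xa, xb) with hseen₁
        have hmem₁ : ∀ c, pvMemB seen₁ c = true ↔ pvMemB seen c = true ∨ c = (xa, xb) :=
          fun c => pvMemB_add seen (xa, xb) c
        have hmark : pvMemB seen₁ (xa, xb) = true := (hmem₁ _).2 (Or.inr rfl)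
        have hU : pvU n m (pvMemB seen₁) + 1 = pvU n m (pvMemB seen) := by
          apply pvU_mark n m (pvMemB seen) (pvMemB seen₁) (xa, xb) hInR hfresh hmark
          intro c hc hne
          cases hA : pvMemB seen c
          · cases hB : pvMemB seen₁ c
            · rfl
            · rcases (hmem₁ c).1 hB with h | h
              · rw [hA] at h; cases h
              · exact absurd h hne
          · exact (hmem₁ c).2 (Or.inl hA)
        have hadjx : ∀ c ∈ [(xa - 1, xb), (xa + 1, xb), (xa, xb - 1), (xa, xb + 1)],
            pvAdj (xa, xb) c := by
          intro c hc
          exact (pvAdj_iff xa xb c).2 hc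
        obtain ⟨F', hF'props, hr1, hr2, hr3, hr4⟩ :=
          ih (ys ++ [(xa - 1, xb), (xa + 1, xb), (xa, xb - 1), (xa, xb + 1)])
            (total + pvVal maps xa xb) seen₁
            (by simp only [List.length_append, List.length_cons, List.length_nil]; omega)
            (by
              intro c hc hcv
              rcases List.mem_append.1 hc with h' | h'
              · exact hstack' c h' hcv
              · exact hT _ hTx _ ⟨hvalid, hcv, hadjx c h'⟩)
            (by
              intro a ha b hstep
              rcases (hmem₁ a).1 ha with h | h
              · rcases hcl a h b hstep with h' | h'
                · exact Or.inl ((hmem₁ b).2 (Or.inl h'))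
                · rcases List.mem_append.1 h' with h'' | h''
                  · exact Or.inr (List.mem_append_left _ h'')
                  · rcases List.mem_singleton.1 h'' with rfl
                    exact Or.inl hmark
              · subst h
                exact Or.inr (List.mem_append_right _
                  ((pvAdj_iff xa xb b).1 hstep.2.2)))
        have hxF' : (xa, xb) ∉ F' := by
          intro hmem
          have := (hF'props _ hmem).2.1
          rw [hmark] at this; cases this
        refine ⟨insert (xa, xb) F', ?_, ?_, ?_, hr3, ?_⟩
        · intro c hc
          rcases Finset.mem_insert.1 hc with rfl | hc
          · exact ⟨hvalid, hfresh, hTx⟩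
          · obtain ⟨hv, hfr, ht⟩ := hF'props c hc
            refine ⟨hv, ?_, ht⟩
            cases hA : pvMemB seen c
            · rfl
            · exfalso
              have := (hmem₁ c).2 (Or.inl hA)
              rw [hfr] at this; cases this
        · rw [hr1, Finset.sum_insert hxF']
          ring
        · intro c
          rw [hr2 c, hmem₁ c, Finset.mem_insert]
          tauto
        · intro c hc hcv
          rcases List.mem_append.1 hc with h' | h'
          · exact hr4 c (List.mem_append_left _ h') hcv
          · rcases List.mem_singleton.1 h' with rfl
            exact (hr2 _).2 (Or.inl hmark)

theorem pvDfs_spec (maps : List String) (n m : Int) (seen : PySem.Set (Int × Int))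
    (i j : Int) (hv : pvValid maps n m (i, j)) (hfresh : pvMemB seen (i, j) = false)
    (hcl : ∀ a, pvMemB seen a = true → ∀ b, pvStep maps n m a b →
      pvMemB seen b = true) :
    ∃ F : Finset (Int × Int),
      (∀ c, c ∈ F ↔ pvReach maps n m (i, j) c) ∧
      ((pvDfsLoop maps n m (5 * (n.toNat * m.toNat) + 2) [(i, j)] 0 seen).1 =
         ∑ c ∈ F, pvVal maps c.1 c.2 ∧
       (∀ c, pvMemB (pvDfsLoop maps n m (5 * (n.toNat * m.toNat) + 2) [(i, j)] 0 seen).2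
           c = true ↔ pvMemB seen c = true ∨ c ∈ F) ∧
       (∀ a, pvMemB (pvDfsLoop maps n m (5 * (n.toNat * m.toNat) + 2) [(i, j)] 0
           seen).2 a = true → ∀ b, pvStep maps n m a b →
         pvMemB (pvDfsLoop maps n m (5 * (n.toNat * m.toNat) + 2) [(i, j)] 0 seen).2
           b = true)) := by
  have hfuel : [(i, j)].length + 5 * pvU n m (pvMemB seen) + 1 ≤
      5 * (n.toNat * m.toNat) + 2 := by
    have := pvU_le n m (pvMemB seen)
    simp only [List.length_singleton]
    omega
  obtain ⟨F, hFprops, hr1, hr2, hr3, hr4⟩ :=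
    pvDfsLoop_spec maps n m (fun c => pvReach maps n m (i, j) c)
      (pvReach_closed maps n m (i, j)) (5 * (n.toNat * m.toNat) + 2) [(i, j)] 0 seen
      hfuel
      (by
        intro c hc _
        rcases List.mem_singleton.1 hc with rfl
        exact Relation.ReflTransGen.refl)
      (fun a ha b hstep => Or.inl (hcl a ha b hstep))
  refine ⟨F, ?_, by rw [hr1]; ring, hr2, hr3⟩
  intro c
  constructor
  · intro hc
    exact (hFprops c hc).2.2
  · intro hreach
    have hcv : pvValid maps n m c := pvReach_valid hv hreach
    have hseedmark : pvMemB (pvDfsLoop maps n m (5 * (n.toNat * m.toNat) + 2) [(i, j)] 0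
        seen).2 (i, j) = true := hr4 (i, j) (List.mem_singleton_self _) hv
    have hmarked : pvMemB (pvDfsLoop maps n m (5 * (n.toNat * m.toNat) + 2) [(i, j)] 0
        seen).2 c = true :=
      pvClosed_reach_subset (S := fun z => pvMemB (pvDfsLoop maps n m
        (5 * (n.toNat * m.toNat) + 2) [(i, j)] 0 seen).2 z = true)
        (fun a ha b hstep => hr3 a ha b hstep) hseedmark hreach
    rcases (hr2 c).1 hmarked with h | h
    · exfalso
      have : pvMemB seen (i, j) = true :=
        pvClosed_reach_subset (S := fun z => pvMemB seen z = true) hcl h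
          (pvReach_symm hreach)
      rw [hfresh] at this; cases this
    · exact h

theorem pvBoolEq {a b : Bool} (h : a = true ↔ b = true) : a = b := by
  cases a <;> cases b <;> simp_all

-- the joint invariant carried through the row/column scan of both programs
def pvInvariant (maps : List String) (n m : Int)
    (stA : List Int × List (List Int)) (stB : List Int × PySem.Set (Int × Int)) : Prop :=
  stA.1 = stB.1 ∧ pvShape n m stA.2 ∧
  (∀ c, pvInR n m c → pvMemA stA.2 c = pvMemB stB.2 c) ∧
  (∀ a, pvMemA stA.2 a = true → ∀ b, pvStep maps n m a b → pvMemA stA.2 b = true)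

theorem pvCol_preserve (maps : List String) (n m i j : Int)
    (stA : List Int × List (List Int)) (stB : List Int × PySem.Set (Int × Int))
    (hi : 0 ≤ i ∧ i < n) (hj : 0 ≤ j ∧ j < m)
    (hInv : pvInvariant maps n m stA stB) :
    pvInvariant maps n m (pvColA maps n m i stA j) (pvColB maps n m i stB j) := by
  obtain ⟨hans, hsh, hmm, hcl⟩ := hInv
  have hInRij : pvInR n m (i, j) := ⟨hi.1, hi.2, hj.1, hj.2⟩
  have hmemij := hmm (i, j) hInRij
  by_cases hgA : pvNeX maps i j = true ∧ pvVget stA.2 i j = 0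
  · have hfreshA : pvMemA stA.2 (i, j) = false := by simp [pvMemA, hgA.2]
    have hfreshB : pvMemB stB.2 (i, j) = false := by rw [← hmemij]; exact hfreshA
    have hgB : pvNeX maps i j = true ∧ ¬ PySem.Set.contains stB.2 (i, j) = true :=
      ⟨hgA.1, by rw [show PySem.Set.contains stB.2 (i, j) = pvMemB stB.2 (i, j) from rfl,
        hfreshB]; simp⟩
    have hvalid : pvValid maps n m (i, j) := ⟨hInRij, hgA.1⟩
    have hclB : ∀ a, pvMemB stB.2 a = true → ∀ b, pvStep maps n m a b →
        pvMemB stB.2 b = true := by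
      intro a ha b hstep
      rw [← hmm b hstep.2.1.1]
      exact hcl a (by rw [hmm a hstep.1.1]; exact ha) b hstep
    obtain ⟨FA, hFA, ha1, ha2, ha3, ha4⟩ :=
      pvBfs_spec maps n m stA.2 i j hsh hvalid hfreshA hcl
    obtain ⟨FB, hFB, hb1, hb2, hb3⟩ :=
      pvDfs_spec maps n m stB.2 i j hvalid hfreshB hclB
    have hFAB : FA = FB := by
      ext c; rw [hFA c, hFB c]
    unfold pvColA pvColB
    rw [if_pos hgA, if_pos hgB]
    refine ⟨?_, ha2, ?_, ha4⟩
    · simp only []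
      rw [hans, ha1, hb1, hFAB]
    · intro c hc
      simp only []
      apply pvBoolEq
      rw [ha3 c hc, hb2 c, hmm c hc, hFAB]
  · have hgB : ¬ (pvNeX maps i j = true ∧ ¬ PySem.Set.contains stB.2 (i, j) = true) := by
      intro ⟨h1, h2⟩
      apply hgA
      refine ⟨h1, ?_⟩
      have : pvMemB stB.2 (i, j) = false := by
        cases h : PySem.Set.contains stB.2 (i, j)
        · exact h
        · exact absurd h h2
      have : pvMemA stA.2 (i, j) = false := by rw [hmemij]; exact this
      simpa [pvMemA] using this
    unfold pvColA pvColB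
    rw [if_neg hgA, if_neg hgB]
    exact ⟨hans, hsh, hmm, hcl⟩

theorem pvFoldCols_preserve (maps : List String) (n m i : Int) (hi : 0 ≤ i ∧ i < n) :
    ∀ (js : List Int), (∀ j ∈ js, 0 ≤ j ∧ j < m) →
    ∀ stA stB, pvInvariant maps n m stA stB →
    pvInvariant maps n m (js.foldl (pvColA maps n m i) stA)
      (js.foldl (pvColB maps n m i) stB) := by
  intro js
  induction js with
  | nil => intro _ stA stB h; exact h
  | cons j js ihs =>
    intro hjs stA stB h
    rw [List.foldl_cons, List.foldl_cons]
    exact ihs (fun q hq => hjs q (List.mem_cons_of_mem _ hq)) _ _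
      (pvCol_preserve maps n m i j stA stB hi (hjs j List.mem_cons_self) h)

theorem pvFoldRows_preserve (maps : List String) (n m : Int) :
    ∀ (is : List Int), (∀ i ∈ is, 0 ≤ i ∧ i < n) →
    ∀ stA stB, pvInvariant maps n m stA stB →
    pvInvariant maps n m (is.foldl (pvRowA maps n m) stA)
      (is.foldl (pvRowB maps n m) stB) := by
  intro is
  induction is with
  | nil => intro _ stA stB h; exact h
  | cons i is ihs =>
    intro his stA stB h
    rw [List.foldl_cons, List.foldl_cons]
    exact ihs (fun q hq => his q (List.mem_cons_of_mem _ hq)) _ _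
      (pvFoldCols_preserve maps n m i (his i List.mem_cons_self) (PySem.List.pyRange 0 m 1)
        (fun j hj => PySem.List.mem_pyRange_one.1 hj) stA stB h)

theorem pvMain (maps : List String) : solution maps = solution_alt maps := by
  set n : Int := PySem.List.len maps with hn
  set m : Int := (match PySem.List.pyGet? maps 0 with
    | some r => PySem.Str.len r
    | none => 0) with hm
  set v0 : List (List Int) := List.replicate n.toNat (List.replicate m.toNat (0 : Int))
    with hv0
  set resA := (PySem.List.pyRange 0 n 1).foldl (pvRowA maps n m) ([], v0) with hresA
  set resB := (PySem.List.pyRange 0 n 1).foldl (pvRowB maps n m) ([], PySem.Set.empty)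
    with hresB
  have hvA : solution maps =
      if resA.1 ≠ [] then PySem.List.sorted resA.1 (fun v => v) false else [-1] := rfl
  have hvB : solution_alt maps =
      if resB.1 ≠ [] then PySem.List.sorted resB.1 (fun v => v) false else [-1] := rfl
  have hmem0A : ∀ c, pvMemA v0 c = false := by
    intro c
    rw [pvMemA_false_iff]
    unfold pvVget
    cases h : PySem.List.pyGet? v0 c.1 with
    | none => simp
    | some row =>
      have hrow : row = List.replicate m.toNat (0 : Int) := by
        have hmem := PySem.List.mem_of_pyGet?_eq_some _ h
        rw [hv0] at hmem
        exact List.eq_of_mem_replicate hmem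
      subst hrow
      cases h2 : PySem.List.pyGet? (List.replicate m.toNat (0 : Int)) c.2 with
      | none => simp [h2]
      | some z =>
        have hz : z = 0 :=
          List.eq_of_mem_replicate (PySem.List.mem_of_pyGet?_eq_some _ h2)
        simp [h2, hz]
  have hmem0B : ∀ c : Int × Int, pvMemB PySem.Set.empty c = false := by
    intro c
    rw [← Bool.not_eq_true, pvMemB_true_iff]
    simp [PySem.Set.empty]
  have hInv0 : pvInvariant maps n m ([], v0) ([], PySem.Set.empty) := by
    refine ⟨rfl, ?_, ?_, ?_⟩
    · constructor
      · simp [hv0]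
      · intro row hrow
        rw [hv0] at hrow
        rw [List.eq_of_mem_replicate hrow]
        simp
    · intro c _
      rw [hmem0A c, hmem0B c]
    · intro a ha
      rw [hmem0A a] at ha; cases ha
  have hInv := pvFoldRows_preserve maps n m (PySem.List.pyRange 0 n 1)
    (fun i hi => PySem.List.mem_pyRange_one.1 hi) ([], v0) ([], PySem.Set.empty) hInv0
  rw [hvA, hvB, hInv.1]

-- ===== VERDICT =====
theorem solution_spec : Claim_equal_solution := by
  intro maps _ _
  unfold Spec_solution
  exact pvMain maps
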